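-- pv_equiv track=rewrite | github.com/Jiezhi/myleetcode | lccn/2022-spring-02.py | perfectMenu
-- ===== SOURCE A (Python) =====
-- import collections
-- from typing import List
--
-- def perfectMenu(materials: List[int], cookbooks: List[List[int]], attribute: List[List[int]],
--                 limit: int) -> int:
--     """
--     meterials.length == 5
--     1 <= cookbooks.length == attribute.length <= 8
--     cookbooks[i].length == 5
--     attribute[i].length == 2
--     0 <= meterials[i], cookbooks[i][j], attribute[i][j] <= 20
--     1 <= limit <= 100
--     """
--     n = len(cookbooks)
--     dq = collections.deque()
--     dq.append((materials, 1, 0, 0))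
--     dq.append(([materials[i] - cookbooks[0][i] for i in range(5)], 1, attribute[0][0], attribute[0][1]))
--     ret = -1
--     while dq:
--         mat, pos, cnt, lim = dq.popleft()
--         if any(x < 0 for x in mat) or pos > n:
--             continue
--         if lim >= limit:
--             ret = max(ret, cnt)
--         if pos == n:
--             continue
--         dq.append(([mat[i] - cookbooks[pos][i] for i in range(5)], pos + 1, cnt + attribute[pos][0],
--                    lim + attribute[pos][1]))
--         dq.append((mat, pos + 1, cnt, lim))
--     return ret
-- ===== SOURCE B (Python) =====
-- def perfectMenu(materials, cookbooks, attribute, limit):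
--     n = len(cookbooks)
--
--     def dfs(mat, pos, cnt, lim, ret):
--         if any(x < 0 for x in mat) or pos > n:
--             return ret
--         if lim >= limit:
--             ret = max(ret, cnt)
--         if pos == n:
--             return ret
--         ret = dfs([mat[i] - cookbooks[pos][i] for i in range(5)], pos + 1,
--                   cnt + attribute[pos][0], lim + attribute[pos][1], ret)
--         return dfs(mat, pos + 1, cnt, lim, ret)
--
--     ret = dfs(materials, 1, 0, 0, -1)
--     return dfs([materials[i] - cookbooks[0][i] for i in range(5)], 1,
--                attribute[0][0], attribute[0][1], ret)
-- ===== Notes on version B (the rewrite author's own statement) =====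
-- stated objective: alternative
-- what changed: Replaced A's BFS over an explicit deque worklist by a recursive DFS over the cookbook index with the max carried in an accumulator (same two-node seeding, pruning and limit check).
-- outside the precondition, e.g. on perfectMenu([-1, 0, 0, 0, 0], [[0, 0, 0, 0, 0], [1, 1]], [[5, 5], [0, 0]], 1): A returns -1, B returns -1
import Mathlib
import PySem

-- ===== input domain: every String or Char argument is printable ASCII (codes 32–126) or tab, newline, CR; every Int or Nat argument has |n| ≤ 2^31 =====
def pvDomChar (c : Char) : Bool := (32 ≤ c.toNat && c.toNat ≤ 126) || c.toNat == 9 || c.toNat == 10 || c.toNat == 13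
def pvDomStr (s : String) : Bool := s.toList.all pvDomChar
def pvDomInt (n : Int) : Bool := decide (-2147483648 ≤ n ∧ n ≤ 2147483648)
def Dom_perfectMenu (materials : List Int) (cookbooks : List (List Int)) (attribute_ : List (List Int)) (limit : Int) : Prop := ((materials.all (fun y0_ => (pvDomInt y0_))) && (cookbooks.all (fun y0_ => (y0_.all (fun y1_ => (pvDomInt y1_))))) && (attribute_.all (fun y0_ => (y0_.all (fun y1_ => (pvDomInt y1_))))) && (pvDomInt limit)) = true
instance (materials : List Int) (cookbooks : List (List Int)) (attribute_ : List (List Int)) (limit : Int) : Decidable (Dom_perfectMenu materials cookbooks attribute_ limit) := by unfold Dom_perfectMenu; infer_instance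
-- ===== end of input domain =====

-- B replaces A's BFS deque worklist by a recursive DFS over the cookbook index (same seeding,
-- same pruning, same return value); objective: alternative decomposition, no speed claim.

-- shared indexing helpers (both Pythons index with the same nonnegative in-range indices on Pre_;
-- the .getD default is never reached there)
def pvGetI (xs : List Int) (i : Int) : Int := (PySem.List.pyGet? xs i).getD 0
def pvRow (xss : List (List Int)) (i : Int) : List Int := (PySem.List.pyGet? xss i).getD []
-- [mat[i] - cb[i] for i in range(5)]
def pvSub5 (mat cb : List Int) : List Int := (PySem.List.pyRange 0 5 1).map (fun i => pvGetI mat i - pvGetI cb i)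
def pvAtt (attribute_ : List (List Int)) (p j : Int) : Int := pvGetI (pvRow attribute_ p) j

-- ===== PORT A =====
-- weight for the termination of the BFS worklist loop
def pvWt (n : Int) (s : List Int × Int × Int × Int) : Nat := 3 ^ (n + 1 - s.2.1).toNat
def pvMeas (n : Int) (dq : List (List Int × Int × Int × Int)) : Nat := (dq.map (pvWt n)).sum

-- the `while dq:` loop of A
def pvBfs (n limit : Int) (cookbooks attribute_ : List (List Int))
    (dq : List (List Int × Int × Int × Int)) (ret : Int) : Int :=
  match dq with
  | [] => ret
  | (mat, pos, cnt, lim) :: rest =>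
    if h1 : (mat.any (fun x => decide (x < 0)) || decide (n < pos)) = true then
      pvBfs n limit cookbooks attribute_ rest ret
    else
      let ret' := if limit ≤ lim then max ret cnt else ret
      if h2 : pos = n then pvBfs n limit cookbooks attribute_ rest ret'
      else pvBfs n limit cookbooks attribute_
        (rest ++ [(pvSub5 mat (pvRow cookbooks pos), pos + 1, cnt + pvAtt attribute_ pos 0,
                   lim + pvAtt attribute_ pos 1),
                  (mat, pos + 1, cnt, lim)]) ret'
  termination_by pvMeas n dq
  decreasing_by
  · have : 0 < pvWt n (mat, pos, cnt, lim) := by unfold pvWt; exact Nat.pow_pos (by norm_num)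
    simp only [pvMeas, List.map_cons, List.sum_cons]; omega
  · have : 0 < pvWt n (mat, pos, cnt, lim) := by unfold pvWt; exact Nat.pow_pos (by norm_num)
    simp only [pvMeas, List.map_cons, List.sum_cons]; omega
  · simp only [Bool.or_eq_true, decide_eq_true_eq, not_or] at h1
    have hlt : pos < n := lt_of_le_of_ne (not_lt.mp h1.2) h2
    simp only [pvMeas, List.map_cons, List.sum_cons, List.map_append, List.sum_append,
      List.map_nil, List.sum_nil, pvWt]
    have hk : (n + 1 - pos).toNat = (n + 1 - (pos + 1)).toNat + 1 := by omega
    rw [hk, pow_succ]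
    have : 0 < 3 ^ (n + 1 - (pos + 1)).toNat := Nat.pow_pos (by norm_num)
    omega

def perfectMenu (materials : List Int) (cookbooks : List (List Int)) (attribute_ : List (List Int)) (limit : Int) : Int :=
  let n : Int := cookbooks.length
  pvBfs n limit cookbooks attribute_
    [(materials, 1, 0, 0),
     (pvSub5 materials (pvRow cookbooks 0), 1, pvAtt attribute_ 0 0, pvAtt attribute_ 0 1)]
    (-1)

-- ===== PORT B =====
-- the recursive `dfs(mat, pos, cnt, lim, ret)` of B
def pvDfs (n limit : Int) (cookbooks attribute_ : List (List Int))
    (mat : List Int) (pos cnt lim ret : Int) : Int :=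
  if h1 : (mat.any (fun x => decide (x < 0)) || decide (n < pos)) = true then ret
  else
    let ret' := if limit ≤ lim then max ret cnt else ret
    if h2 : pos = n then ret'
    else
      let r1 := pvDfs n limit cookbooks attribute_ (pvSub5 mat (pvRow cookbooks pos)) (pos + 1)
        (cnt + pvAtt attribute_ pos 0) (lim + pvAtt attribute_ pos 1) ret'
      pvDfs n limit cookbooks attribute_ mat (pos + 1) cnt lim r1
  termination_by (n + 1 - pos).toNat
  decreasing_by all_goals
    simp only [Bool.or_eq_true, decide_eq_true_eq, not_or] at h1; omega

def perfectMenu_alt (materials : List Int) (cookbooks : List (List Int)) (attribute_ : List (List Int)) (limit : Int) : Int :=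
  let n : Int := cookbooks.length
  let ret := pvDfs n limit cookbooks attribute_ materials 1 0 0 (-1)
  pvDfs n limit cookbooks attribute_ (pvSub5 materials (pvRow cookbooks 0)) 1
    (pvAtt attribute_ 0 0) (pvAtt attribute_ 0 1) ret

-- ===== PRECONDITION & SPEC =====
-- Pre_ excludes inputs on which A raises (materials shorter than 5, empty cookbooks, a reachable
-- cookbook row shorter than 5 or attribute row shorter than 2, attribute shorter than cookbooks);
-- it is slightly narrower than A's return set only on inputs whose malformed rows are unreachable
-- because every search branch is pruned first — there both programs return -1 anyway.
def Pre_perfectMenu (materials : List Int) (cookbooks : List (List Int)) (attribute_ : List (List Int)) (limit : Int) : Prop :=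
  5 ≤ materials.length ∧ cookbooks ≠ [] ∧ (∀ c ∈ cookbooks, 5 ≤ c.length) ∧
    cookbooks.length ≤ attribute_.length ∧ ∀ a ∈ attribute_.take cookbooks.length, 2 ≤ a.length
instance (materials : List Int) (cookbooks : List (List Int)) (attribute_ : List (List Int)) (limit : Int) : Decidable (Pre_perfectMenu materials cookbooks attribute_ limit) := by unfold Pre_perfectMenu; infer_instance

def pvWitness_perfectMenu : List Int × List (List Int) × List (List Int) × Int :=
  ([10, 10, 10, 10, 10], [[1, 1, 1, 1, 1], [3, 2, 4, 1, 5]], [[3, 2], [10, 5]], 1)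

def Spec_perfectMenu (materials : List Int) (cookbooks : List (List Int)) (attribute_ : List (List Int)) (limit : Int) (out : Int) : Prop := out = perfectMenu_alt materials cookbooks attribute_ limit
instance (materials : List Int) (cookbooks : List (List Int)) (attribute_ : List (List Int)) (limit : Int) (out : Int) : Decidable (Spec_perfectMenu materials cookbooks attribute_ limit out) := by unfold Spec_perfectMenu; infer_instance

-- ===== CLAIM (what is proved, stated in full; the proofs are below) =====
def Claim_equal_perfectMenu : Prop := ∀ (materials : List Int) (cookbooks : List (List Int)) (attribute_ : List (List Int)) (limit : Int), Dom_perfectMenu materials cookbooks attribute_ limit → Pre_perfectMenu materials cookbooks attribute_ limit → Spec_perfectMenu materials cookbooks attribute_ limit (perfectMenu materials cookbooks attribute_ limit)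

-- ===== LEMMAS AND PROOFS =====

-- the value a DFS node contributes, independently of the accumulator
def pvOmax (r : Int) (o : Option Int) : Int := match o with | none => r | some v => max r v
def pvOmaxO (a b : Option Int) : Option Int :=
  match a, b with
  | none, b => b
  | some x, none => some x
  | some x, some y => some (max x y)

def pvVal (n limit : Int) (cookbooks attribute_ : List (List Int))
    (mat : List Int) (pos cnt lim : Int) : Option Int :=
  if h1 : (mat.any (fun x => decide (x < 0)) || decide (n < pos)) = true then none
  else
    let nodev : Option Int := if limit ≤ lim then some cnt else none
    if h2 : pos = n then nodev
    else pvOmaxO nodev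
      (pvOmaxO
        (pvVal n limit cookbooks attribute_ (pvSub5 mat (pvRow cookbooks pos)) (pos + 1)
          (cnt + pvAtt attribute_ pos 0) (lim + pvAtt attribute_ pos 1))
        (pvVal n limit cookbooks attribute_ mat (pos + 1) cnt lim))
  termination_by (n + 1 - pos).toNat
  decreasing_by all_goals
    simp only [Bool.or_eq_true, decide_eq_true_eq, not_or] at h1; omega

theorem pvOmax_omaxO (r : Int) (a b : Option Int) :
    pvOmax (pvOmax r a) b = pvOmax r (pvOmaxO a b) := by
  cases a <;> cases b <;> simp [pvOmax, pvOmaxO, max_assoc]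

theorem pvDfs_eq_omax_aux (n limit : Int) (cookbooks attribute_ : List (List Int)) :
    ∀ (k : Nat) (mat : List Int) (pos cnt lim ret : Int), (n + 1 - pos).toNat ≤ k →
      pvDfs n limit cookbooks attribute_ mat pos cnt lim ret =
        pvOmax ret (pvVal n limit cookbooks attribute_ mat pos cnt lim) := by
  intro k
  induction k with
  | zero =>
    intro mat pos cnt lim ret hk
    have hb : (mat.any (fun x => decide (x < 0)) || decide (n < pos)) = true := by
      simp only [Bool.or_eq_true, decide_eq_true_eq]; right; omega
    rw [pvDfs, pvVal]; simp only [dif_pos hb]; rfl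
  | succ k ih =>
    intro mat pos cnt lim ret hk
    rw [pvDfs, pvVal]
    by_cases hb : (mat.any (fun x => decide (x < 0)) || decide (n < pos)) = true
    · simp only [dif_pos hb]; rfl
    · simp only [dif_neg hb]
      by_cases hp : pos = n
      · simp only [dif_pos hp]; split_ifs <;> simp [pvOmax]
      · simp only [dif_neg hp]
        have hle : n + 1 - (pos + 1) ≥ 0 ∧ (n + 1 - (pos + 1)).toNat ≤ k := by
          simp only [Bool.or_eq_true, decide_eq_true_eq, not_or] at hb
          constructor <;> omega
        rw [ih _ _ _ _ _ hle.2, ih _ _ _ _ _ hle.2, pvOmax_omaxO]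
        have hnode : (if limit ≤ lim then max ret cnt else ret) =
            pvOmax ret (if limit ≤ lim then some cnt else none) := by
          split_ifs <;> simp [pvOmax]
        rw [hnode, pvOmax_omaxO]

theorem pvDfs_eq_omax (n limit : Int) (cookbooks attribute_ : List (List Int))
    (mat : List Int) (pos cnt lim ret : Int) :
    pvDfs n limit cookbooks attribute_ mat pos cnt lim ret =
      pvOmax ret (pvVal n limit cookbooks attribute_ mat pos cnt lim) :=
  pvDfs_eq_omax_aux n limit cookbooks attribute_ (n + 1 - pos).toNat mat pos cnt lim ret le_rfl

theorem pvDfs_comm (n limit : Int) (cookbooks attribute_ : List (List Int))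
    (m1 m2 : List Int) (p1 c1 l1 p2 c2 l2 r : Int) :
    pvDfs n limit cookbooks attribute_ m1 p1 c1 l1
      (pvDfs n limit cookbooks attribute_ m2 p2 c2 l2 r) =
    pvDfs n limit cookbooks attribute_ m2 p2 c2 l2
      (pvDfs n limit cookbooks attribute_ m1 p1 c1 l1 r) := by
  simp only [pvDfs_eq_omax]
  cases pvVal n limit cookbooks attribute_ m1 p1 c1 l1 <;>
    cases pvVal n limit cookbooks attribute_ m2 p2 c2 l2 <;>
      simp [pvOmax, max_comm, max_left_comm]

def pvStep (n limit : Int) (cookbooks attribute_ : List (List Int))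
    (r : Int) (s : List Int × Int × Int × Int) : Int :=
  pvDfs n limit cookbooks attribute_ s.1 s.2.1 s.2.2.1 s.2.2.2 r

theorem pvDfs_foldl (n limit : Int) (cookbooks attribute_ : List (List Int))
    (dq : List (List Int × Int × Int × Int)) (m : List Int) (p c l r : Int) :
    pvDfs n limit cookbooks attribute_ m p c l (dq.foldl (pvStep n limit cookbooks attribute_) r) =
      dq.foldl (pvStep n limit cookbooks attribute_) (pvDfs n limit cookbooks attribute_ m p c l r) := by
  induction dq generalizing r with
  | nil => rfl
  | cons x xs ih => simp only [List.foldl_cons, pvStep]; rw [ih, pvDfs_comm]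

theorem pvStep_cons (n limit : Int) (cookbooks attribute_ : List (List Int))
    (s : List Int × Int × Int × Int) (rest : List (List Int × Int × Int × Int)) (r : Int) :
    ((s :: rest).foldl (pvStep n limit cookbooks attribute_) r) =
      rest.foldl (pvStep n limit cookbooks attribute_)
        (pvDfs n limit cookbooks attribute_ s.1 s.2.1 s.2.2.1 s.2.2.2 r) := rfl

theorem pvBfs_eq_foldl_aux (n limit : Int) (cookbooks attribute_ : List (List Int)) :
    ∀ (k : Nat) (dq : List (List Int × Int × Int × Int)) (ret : Int), pvMeas n dq ≤ k →
      pvBfs n limit cookbooks attribute_ dq ret =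
        dq.foldl (pvStep n limit cookbooks attribute_) ret := by
  intro k
  induction k with
  | zero =>
    intro dq ret hk
    match dq with
    | [] => rw [pvBfs]; rfl
    | s :: rest =>
      exfalso
      have : 0 < pvWt n s := Nat.pow_pos (by norm_num)
      simp only [pvMeas, List.map_cons, List.sum_cons] at hk; omega
  | succ k ih =>
    intro dq ret hk
    match dq with
    | [] => rw [pvBfs]; rfl
    | (mat, pos, cnt, lim) :: rest =>
      have hwt : 0 < pvWt n (mat, pos, cnt, lim) := Nat.pow_pos (by norm_num)
      have hrest : pvMeas n rest ≤ k := by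
        simp only [pvMeas, List.map_cons, List.sum_cons] at hk ⊢; omega
      rw [pvBfs, pvStep_cons]
      by_cases hb : (mat.any (fun x => decide (x < 0)) || decide (n < pos)) = true
      · simp only [dif_pos hb]
        rw [ih rest ret hrest]; congr 1
        rw [pvDfs]; simp only [dif_pos hb]
      · simp only [dif_neg hb]
        by_cases hp : pos = n
        · simp only [dif_pos hp]
          rw [ih rest _ hrest]; congr 1
          rw [pvDfs]; simp only [dif_neg hb, dif_pos hp]
        · simp only [dif_neg hp]
          have hposn : pos < n := by
            simp only [Bool.or_eq_true, decide_eq_true_eq, not_or] at hb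
            omega
          have hmeas : pvMeas n (rest ++
              [(pvSub5 mat (pvRow cookbooks pos), pos + 1, cnt + pvAtt attribute_ pos 0,
                lim + pvAtt attribute_ pos 1), (mat, pos + 1, cnt, lim)]) ≤ k := by
            simp only [pvMeas, List.map_cons, List.sum_cons, List.map_append, List.sum_append,
              List.map_nil, List.sum_nil, pvWt] at hk ⊢
            have hk1 : (n + 1 - pos).toNat = (n + 1 - (pos + 1)).toNat + 1 := by omega
            rw [hk1, pow_succ] at hk
            have : 0 < 3 ^ (n + 1 - (pos + 1)).toNat := Nat.pow_pos (by norm_num)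
            omega
          rw [ih _ _ hmeas, List.foldl_append]
          simp only [List.foldl_cons, List.foldl_nil, pvStep]
          rw [pvDfs_foldl, pvDfs_foldl]
          congr 1
          conv_rhs => rw [pvDfs]
          simp only [dif_neg hb, dif_neg hp]

theorem pvBfs_eq_foldl (n limit : Int) (cookbooks attribute_ : List (List Int))
    (dq : List (List Int × Int × Int × Int)) (ret : Int) :
    pvBfs n limit cookbooks attribute_ dq ret =
      dq.foldl (pvStep n limit cookbooks attribute_) ret :=
  pvBfs_eq_foldl_aux n limit cookbooks attribute_ (pvMeas n dq) dq ret le_rfl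

-- ===== VERDICT (by name: the statement is the Claim_ definition above) =====
theorem perfectMenu_spec : Claim_equal_perfectMenu := by
  intro materials cookbooks attribute_ limit _ _
  unfold Spec_perfectMenu perfectMenu perfectMenu_alt
  rw [pvBfs_eq_foldl]
  simp [pvStep, List.foldl]
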